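-- pv_equiv track=rewrite | github.com/lbormann/darts-caller | darts-caller.py | grab_caller_gender
-- ===== SOURCE A (Python) =====
-- CALLER_GENDERS = {
--     1: ['female', 'f'],
--     2: ['male', 'm'],
-- }
--
-- def grab_caller_gender(caller_name):
--     first_occurrences = []
--     caller_name = '-' + caller_name + '-'
--     for key in CALLER_GENDERS:
--         for tag in CALLER_GENDERS[key]:
--             tag_with_dashes = '-' + tag + '-'
--             index = caller_name.find(tag_with_dashes)
--             if index != -1:  # find returns -1 if the tag is not found
--                 first_occurrences.append((index, key))
--
--     if not first_occurrences:  # if the list is empty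
--         return None
--
--     # Sort the list of first occurrences and get the gender of the tag that appears first
--     first_occurrences.sort(key=lambda x: x[0])
--     return first_occurrences[0][1]
-- ===== SOURCE B (Python) =====
-- def grab_caller_gender(caller_name):
--     gender_by_tag = {'female': 1, 'f': 1, 'male': 2, 'm': 2}
--     token = []
--     for ch in caller_name + '-':
--         if ch == '-':
--             key = gender_by_tag.get(''.join(token))
--             if key is not None:
--                 return key
--             token = []
--         else:
--             token.append(ch)
--     return None
-- ===== Notes on version B (the rewrite author's own statement) =====
-- stated objective: alternative
-- what changed: B replaces A's four whole-string substring searches for dash-delimited tags plus a sort of the hit indices by a single left-to-right scan that accumulates the current dash-delimited token and returns the gender of the first token found in a tag-to-gender dict.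
import Mathlib
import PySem

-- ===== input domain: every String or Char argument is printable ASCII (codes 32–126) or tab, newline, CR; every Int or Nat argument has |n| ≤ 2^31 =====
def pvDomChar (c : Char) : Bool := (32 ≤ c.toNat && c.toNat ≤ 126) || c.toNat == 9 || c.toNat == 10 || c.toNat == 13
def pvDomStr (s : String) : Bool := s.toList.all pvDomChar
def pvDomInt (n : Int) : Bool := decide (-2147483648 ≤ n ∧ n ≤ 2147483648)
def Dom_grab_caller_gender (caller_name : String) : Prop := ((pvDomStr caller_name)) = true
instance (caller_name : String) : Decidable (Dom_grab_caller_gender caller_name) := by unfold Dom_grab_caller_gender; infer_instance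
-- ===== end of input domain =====

-- B replaces A's four substring searches plus a sort by one left-to-right scan that
-- accumulates the current dash-delimited token and looks it up in a tag→gender dict
-- (objective: alternative — a single pass with no find/sort; same return value everywhere).

-- ===== PORT A =====
-- the dict CALLER_GENDERS flattened to (tag, key) pairs in Python's iteration order
def pvTags : List (List Char × Int) :=
  [(['f','e','m','a','l','e'], 1), (['f'], 1), (['m','a','l','e'], 2), (['m'], 2)]

-- the for-loop building first_occurrences
def pvOccs (s : List Char) : List (Int × Int) :=
  pvTags.foldl (fun acc p =>
    let index := PySem.Chars.find s ('-' :: p.1 ++ ['-'])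
    if index ≠ -1 then acc ++ [(index, p.2)] else acc) []

def grab_caller_gender (caller_name : String) : Option Int :=
  let s : List Char := '-' :: caller_name.toList ++ ['-']
  let first_occurrences := pvOccs s
  if first_occurrences = [] then none
  else
    match PySem.List.sorted first_occurrences (fun x => x.1) false with
    | [] => none   -- unreachable: sorted of a nonempty list is nonempty
    | x :: _ => some x.2

-- ===== PORT B =====
def pvGenderByTag : PySem.Dict (List Char) Int :=
  PySem.Dict.ofList [(['f','e','m','a','l','e'], 1), (['f'], 1), (['m','a','l','e'], 2), (['m'], 2)]

-- B's for-loop: walk the characters, `token` is the accumulator list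
def pvAltGo : List Char → List Char → Option Int
  | [], _ => none
  | ch :: rest, token =>
    if ch = '-' then
      match pvGenderByTag.get? token with
      | some key => some key
      | none => pvAltGo rest []
    else pvAltGo rest (token ++ [ch])

def grab_caller_gender_alt (caller_name : String) : Option Int :=
  pvAltGo (caller_name.toList ++ ['-']) []

-- ===== PRECONDITION & SPEC =====
def Spec_grab_caller_gender (caller_name : String) (out : Option Int) : Prop := out = grab_caller_gender_alt caller_name
instance (caller_name : String) (out : Option Int) : Decidable (Spec_grab_caller_gender caller_name out) := by unfold Spec_grab_caller_gender; infer_instance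

-- ===== CLAIM (what is proved, stated in full; the proofs are below) =====
def Claim_equal_grab_caller_gender : Prop := ∀ (caller_name : String), Dom_grab_caller_gender caller_name → Spec_grab_caller_gender caller_name (grab_caller_gender caller_name)

-- ===== LEMMAS AND PROOFS =====

-- A's tail (emptiness test, sort, take the head's key) as a function of the occurrence list
def pvPick (l : List (Int × Int)) : Option Int :=
  if l = [] then none
  else
    match PySem.List.sorted l (fun x => x.1) false with
    | [] => none
    | x :: _ => some x.2

theorem pvGrab_eq (c : String) :
    grab_caller_gender c = pvPick (pvOccs ('-' :: c.toList ++ ['-'])) := rfl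

def pvNoDash (t : List Char) : Prop := '-' ∉ t

-- one entry of the occurrence list
def pvE (s tag : List Char) (k : Int) : List (Int × Int) :=
  if PySem.Chars.find s ('-' :: tag ++ ['-']) ≠ -1
  then [(PySem.Chars.find s ('-' :: tag ++ ['-']), k)] else []

theorem pvOccs_eq (s : List Char) :
    pvOccs s = pvE s ['f','e','m','a','l','e'] 1 ++ pvE s ['f'] 1 ++
               pvE s ['m','a','l','e'] 2 ++ pvE s ['m'] 2 := by
  simp only [pvOccs, pvTags, List.foldl, pvE]
  split_ifs <;> simp

-- lookup in B's dict, spelled out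
theorem pvLookup_eq (t : List Char) :
    pvGenderByTag.get? t =
      if t = ['f','e','m','a','l','e'] then some 1
      else if t = ['f'] then some 1
      else if t = ['m','a','l','e'] then some 2
      else if t = ['m'] then some 2
      else none := by
  have h : pvGenderByTag = PySem.Dict.mk [(['f','e','m','a','l','e'], 1), (['f'], 1), (['m','a','l','e'], 2), (['m'], 2)] := by decide
  rw [h]
  simp only [PySem.Dict.get?_mk_cons, beq_iff_eq]
  simp only [@eq_comm _ t]
  simp [PySem.Dict.get?]

-- (tag ++ ['-']) is a prefix of (t ++ '-' :: u) iff tag = t, for dash-free tag and t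
theorem pvPrefix_core (tag : List Char) : ∀ (t u : List Char), pvNoDash tag → pvNoDash t →
    ((tag ++ ['-']) <+: (t ++ '-' :: u) ↔ tag = t) := by
  induction tag with
  | nil =>
    intro t u _ ht
    cases t with
    | nil => simp
    | cons c t' =>
      simp only [List.nil_append, List.cons_append, List.cons_prefix_cons]
      constructor
      · rintro ⟨rfl, -⟩; exact absurd (List.mem_cons_self ..) ht
      · intro h; cases h
  | cons a tag' ih =>
    intro t u htag ht
    cases t with
    | nil =>
      simp only [List.cons_append, List.nil_append, List.cons_prefix_cons]
      constructor
      · rintro ⟨rfl, -⟩; exact absurd (List.mem_cons_self ..) htag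
      · intro h; cases h
    | cons c t' =>
      simp only [List.cons_append, List.cons_prefix_cons]
      have htag' : pvNoDash tag' := fun h => htag (List.mem_cons_of_mem _ h)
      have ht' : pvNoDash t' := fun h => ht (List.mem_cons_of_mem _ h)
      rw [ih t' u htag' ht']
      constructor
      · rintro ⟨rfl, rfl⟩; rfl
      · intro h; cases h; exact ⟨rfl, rfl⟩

-- infix ↔ some suffix has it as a prefix
theorem pvInfix_iff_drop (sub s : List Char) : sub <:+: s ↔ ∃ j, sub <+: s.drop j := by
  rw [← PySem.Chars.isIn_iff_infix, ← PySem.Chars.exists_prefix_drop_iff_isIn]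

-- find = N from an occurrence at N and none earlier
theorem pvFind_eq_of (s sub : List Char) (N : ℕ)
    (hocc : sub <+: s.drop N) (hmin : ∀ i < N, ¬ sub <+: s.drop i) :
    PySem.Chars.find s sub = (N : Int) := by
  have hinf : sub <:+: s := (pvInfix_iff_drop sub s).2 ⟨N, hocc⟩
  have h0 : 0 ≤ PySem.Chars.find s sub := (PySem.Chars.find_nonneg_iff s sub).2 hinf
  obtain ⟨h1, h2⟩ := PySem.Chars.find_spec h0
  have hne : (PySem.Chars.find s sub).toNat = N := by
    rcases lt_trichotomy (PySem.Chars.find s sub).toNat N with h | h | h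
    · exact absurd h1 (hmin _ h)
    · exact h
    · exact absurd hocc (h2 N h)
  omega

theorem pvPrefix0 (t u tag : List Char) (ht : pvNoDash t) (htag : pvNoDash tag) :
    ('-' :: tag ++ ['-']) <+: (('-' :: t) ++ '-' :: u) ↔ tag = t := by
  show ('-' :: (tag ++ ['-'])) <+: ('-' :: (t ++ '-' :: u)) ↔ tag = t
  rw [List.cons_prefix_cons]
  simp only [true_and]
  exact pvPrefix_core tag t u htag ht

theorem pvMid (t u tag : List Char) (ht : pvNoDash t) (j : ℕ) (h1 : 1 ≤ j) (h2 : j ≤ t.length) :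
    ¬ ('-' :: tag ++ ['-']) <+: (('-' :: t) ++ '-' :: u).drop j := by
  intro hp
  obtain ⟨i, rfl⟩ : ∃ i, j = i + 1 := ⟨j - 1, by omega⟩
  have hi : i < t.length := by omega
  have hdrop : (('-' :: t) ++ '-' :: u).drop (i + 1) = t[i] :: (t.drop (i + 1) ++ '-' :: u) := by
    show (('-' :: (t ++ '-' :: u))).drop (i + 1) = _
    rw [List.drop_succ_cons, List.drop_append]
    have h0 : i - t.length = 0 := by omega
    rw [h0, List.drop_zero, List.drop_eq_getElem_cons hi, List.cons_append]
  rw [hdrop] at hp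
  have : '-' = t[i] := (List.cons_prefix_cons.1 hp).1
  exact ht (this ▸ List.getElem_mem hi)

theorem pvHigh (t u : List Char) (j : ℕ) (h : t.length + 1 ≤ j) :
    (('-' :: t) ++ '-' :: u).drop j = ('-' :: u).drop (j - (t.length + 1)) := by
  rw [List.drop_append, List.drop_eq_nil_of_le (by simp; omega), List.nil_append]
  simp

-- the step characterisation of A's find on a padded string
theorem pvFL (t u tag : List Char) (ht : pvNoDash t) (htag : pvNoDash tag) :
    PySem.Chars.find (('-' :: t) ++ '-' :: u) ('-' :: tag ++ ['-']) =
      (if tag = t then 0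
       else
        (if PySem.Chars.find ('-' :: u) ('-' :: tag ++ ['-']) = -1 then -1
         else PySem.Chars.find ('-' :: u) ('-' :: tag ++ ['-']) + (t.length + 1))) := by
  set sub := '-' :: tag ++ ['-'] with hsub
  set s := ('-' :: t) ++ '-' :: u with hs
  by_cases heq : tag = t
  · rw [if_pos heq]
    have hocc : sub <+: s.drop 0 := by
      rw [List.drop_zero]
      exact (pvPrefix0 t u tag ht htag).2 heq
    exact pvFind_eq_of s sub 0 hocc (by omega)
  · rw [if_neg heq]
    by_cases hg : PySem.Chars.find ('-' :: u) sub = -1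
    · rw [if_pos hg]
      rw [PySem.Chars.find_eq_neg_one_iff]
      intro hinf
      obtain ⟨j, hj⟩ := (pvInfix_iff_drop sub s).1 hinf
      rcases Nat.lt_or_ge j 1 with h | h
      · interval_cases j
        rw [List.drop_zero] at hj
        exact heq ((pvPrefix0 t u tag ht htag).1 hj)
      · rcases Nat.lt_or_ge j (t.length + 1) with h' | h'
        · exact pvMid t u tag ht j h (by omega) hj
        · rw [pvHigh t u j h'] at hj
          have : sub <:+: ('-' :: u) := (pvInfix_iff_drop sub _).2 ⟨_, hj⟩
          exact (PySem.Chars.find_eq_neg_one_iff _ _).1 hg this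
    · rw [if_neg hg]
      have hg0 : 0 ≤ PySem.Chars.find ('-' :: u) sub := by
        have := PySem.Chars.neg_one_le_find ('-' :: u) sub
        omega
      obtain ⟨p1, p2⟩ := PySem.Chars.find_spec hg0
      set M := (PySem.Chars.find ('-' :: u) sub).toNat with hM
      have hocc : sub <+: s.drop (M + (t.length + 1)) := by
        rw [pvHigh t u _ (by omega)]
        simpa using p1
      have hmin : ∀ i < M + (t.length + 1), ¬ sub <+: s.drop i := by
        intro i hi hp
        rcases Nat.lt_or_ge i 1 with h | h
        · interval_cases i
          rw [List.drop_zero] at hp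
          exact heq ((pvPrefix0 t u tag ht htag).1 hp)
        · rcases Nat.lt_or_ge i (t.length + 1) with h' | h'
          · exact pvMid t u tag ht i h (by omega) hp
          · rw [pvHigh t u i h'] at hp
            exact p2 (i - (t.length + 1)) (by omega) hp
      have := pvFind_eq_of s sub (M + (t.length + 1)) hocc hmin
      rw [this]
      have : PySem.Chars.find ('-' :: u) sub = (M : Int) := by omega
      rw [this]
      push_cast
      ring

-- the three behaviours of one occurrence entry on a padded string
theorem pvE_self (t u : List Char) (k : Int) (ht : pvNoDash t) :
    pvE (('-' :: t) ++ '-' :: u) t k = [(0, k)] := by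
  unfold pvE
  rw [pvFL t u t ht ht, if_pos rfl]
  simp

theorem pvE_shift (t u tag : List Char) (k : Int) (ht : pvNoDash t) (htag : pvNoDash tag)
    (hne : tag ≠ t) :
    pvE (('-' :: t) ++ '-' :: u) tag k =
      (pvE ('-' :: u) tag k).map (fun p => (p.1 + ((t.length : Int) + 1), p.2)) := by
  unfold pvE
  rw [pvFL t u tag ht htag, if_neg hne]
  rcases eq_or_ne (PySem.Chars.find ('-' :: u) ('-' :: tag ++ ['-'])) (-1) with hg | hg
  · rw [hg]
    norm_num
  · have hg0 : 0 ≤ PySem.Chars.find ('-' :: u) ('-' :: tag ++ ['-']) := by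
      have := PySem.Chars.neg_one_le_find ('-' :: u) ('-' :: tag ++ ['-'])
      omega
    have hne' : PySem.Chars.find ('-' :: u) ('-' :: tag ++ ['-']) + ((t.length : Int) + 1) ≠ -1 := by
      have : (0 : Int) ≤ (t.length : Int) := Int.natCast_nonneg _
      omega
    rw [if_neg hg, if_pos hne', if_pos hg]
    simp

theorem pvE_pos (t u tag : List Char) (k : Int) (ht : pvNoDash t) (htag : pvNoDash tag)
    (hne : tag ≠ t) : ∀ y ∈ pvE (('-' :: t) ++ '-' :: u) tag k, 0 < y.1 := by
  intro y hy
  rw [pvE_shift t u tag k ht htag hne] at hy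
  obtain ⟨p, hp, rfl⟩ := List.mem_map.1 hy
  unfold pvE at hp
  rcases eq_or_ne (PySem.Chars.find ('-' :: u) ('-' :: tag ++ ['-'])) (-1) with hg | hg
  · rw [hg] at hp
    norm_num at hp
  · have hg0 : 0 ≤ PySem.Chars.find ('-' :: u) ('-' :: tag ++ ['-']) := by
      have := PySem.Chars.neg_one_le_find ('-' :: u) ('-' :: tag ++ ['-'])
      omega
    rw [if_pos hg] at hp
    have hp' : p = (PySem.Chars.find ('-' :: u) ('-' :: tag ++ ['-']), k) := by simpa using hp
    subst hp'
    have : (0 : Int) ≤ (t.length : Int) := Int.natCast_nonneg _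
    simp only
    omega

-- sorted commutes with shifting every key by the same constant
theorem pvInsertBy_shift (c : Int) (x : Int × Int) : ∀ (ys : List (Int × Int)),
    PySem.List.insertBy (fun a b => decide (a.1 < b.1)) ((x.1 + c, x.2))
        (ys.map (fun p => (p.1 + c, p.2))) =
      (PySem.List.insertBy (fun a b => decide (a.1 < b.1)) x ys).map (fun p => (p.1 + c, p.2)) := by
  intro ys
  induction ys with
  | nil => simp [PySem.List.insertBy]
  | cons y ys ih =>
    simp only [List.map_cons, PySem.List.insertBy]
    have hcmp : (decide (x.1 + c < y.1 + c)) = decide (x.1 < y.1) := by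
      simp only [decide_eq_decide]; omega
    rw [hcmp]
    by_cases h : x.1 < y.1
    · simp [h]
    · simp only [h, decide_false, Bool.false_eq_true, if_false, List.map_cons]
      rw [ih]

theorem pvSorted_shift (l : List (Int × Int)) (c : Int) :
    PySem.List.sorted (l.map (fun p => (p.1 + c, p.2))) (fun x => x.1) false =
      (PySem.List.sorted l (fun x => x.1) false).map (fun p => (p.1 + c, p.2)) := by
  rw [PySem.List.sorted_eq_foldl_insertBy, PySem.List.sorted_eq_foldl_insertBy]
  suffices h : ∀ (acc : List (Int × Int)),
      List.foldl (fun acc x => PySem.List.insertBy (fun a b => decide (a.1 < b.1)) x acc)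
        (acc.map (fun p => (p.1 + c, p.2))) (l.map (fun p => (p.1 + c, p.2))) =
      (List.foldl (fun acc x => PySem.List.insertBy (fun a b => decide (a.1 < b.1)) x acc) acc l).map
        (fun p => (p.1 + c, p.2)) by
    simpa using h []
  induction l with
  | nil => intro acc; simp
  | cons y l ih =>
    intro acc
    simp only [List.map_cons, List.foldl_cons]
    rw [pvInsertBy_shift c y acc, ih]

theorem pvPick_shift (l : List (Int × Int)) (c : Int) :
    pvPick (l.map (fun p => (p.1 + c, p.2))) = pvPick l := by
  unfold pvPick
  rw [pvSorted_shift]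
  rcases h : PySem.List.sorted l (fun x => x.1) false with _ | ⟨m, tl⟩
  · have : l = [] := (PySem.List.sorted_eq_nil_iff l _ false).1 h
    simp [this]
  · have hne : l ≠ [] := by
      intro hl
      rw [(PySem.List.sorted_eq_nil_iff l (fun x => x.1) false).2 hl] at h
      cases h
    simp [hne, List.map_eq_nil_iff]

-- head of the sorted occurrence list when one entry has the strictly smallest key 0
theorem pvPick_min (l : List (Int × Int)) (k : Int)
    (h0 : ((0 : Int), k) ∈ l) (hpos : ∀ y ∈ l, y = ((0 : Int), k) ∨ 0 < y.1) :
    pvPick l = some k := by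
  have hne : l ≠ [] := by rintro rfl; simp at h0
  rcases h : PySem.List.sorted l (fun x => x.1) false with _ | ⟨m, tl⟩
  · exact absurd ((PySem.List.sorted_eq_nil_iff l _ false).1 h) hne
  · have hmle := PySem.List.key_head_sorted_le l (fun x => x.1) h _ h0
    have hm : m ∈ l := (PySem.List.mem_sorted l _ false m).1 (h ▸ List.mem_cons_self ..)
    rcases hpos m hm with rfl | hposm
    · unfold pvPick
      simp [hne, h]
    · simp only at hmle
      omega

-- B's scan over a dash-free block followed by a dash
theorem pvB_step (t : List Char) : pvNoDash t → ∀ (r acc : List Char),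
    pvAltGo (t ++ '-' :: r) acc =
      match pvGenderByTag.get? (acc ++ t) with
      | some key => some key
      | none => pvAltGo r [] := by
  induction t with
  | nil =>
    intro _ r acc
    simp [pvAltGo]
  | cons c t' ih =>
    intro ht r acc
    have hc : c ≠ '-' := fun h => ht (h ▸ List.mem_cons_self ..)
    have ht' : pvNoDash t' := fun h => ht (List.mem_cons_of_mem _ h)
    show pvAltGo (c :: (t' ++ '-' :: r)) acc = _
    rw [pvAltGo, if_neg hc, ih ht' r (acc ++ [c])]
    simp

-- every string is a dash-free block, possibly followed by a dash and a rest
theorem pvDecomp (cs : List Char) :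
    pvNoDash cs ∨ ∃ t r, cs = t ++ '-' :: r ∧ pvNoDash t := by
  induction cs with
  | nil => left; simp [pvNoDash]
  | cons c cs' ih =>
    by_cases hc : c = '-'
    · right; exact ⟨[], cs', by simp [hc], by simp [pvNoDash]⟩
    · rcases ih with h | ⟨t, r, rfl, ht⟩
      · left; intro hm; rcases List.mem_cons.1 hm with rfl | hm
        · exact hc rfl
        · exact h hm
      · right; refine ⟨c :: t, r, rfl, ?_⟩
        intro hm; rcases List.mem_cons.1 hm with rfl | hm
        · exact hc rfl
        · exact ht hm

-- A's value on a padded string = B's dict lookup on the first token, else recurse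
theorem pvStepA (t u : List Char) (ht : pvNoDash t) :
    pvPick (pvOccs (('-' :: t) ++ '-' :: u)) =
      match pvGenderByTag.get? t with
      | some key => some key
      | none => pvPick (pvOccs ('-' :: u)) := by
  rw [pvLookup_eq]
  by_cases h1 : t = ['f','e','m','a','l','e']
  · subst h1
    rw [if_pos rfl, pvOccs_eq]
    apply pvPick_min _ 1
    · rw [pvE_self _ u 1 ht]
      simp
    · intro y hy
      simp only [List.mem_append] at hy
      rw [pvE_self _ u 1 ht] at hy
      rcases hy with ((h | h) | h) | h
      · left; simpa using h
      · right; exact pvE_pos _ u ['f'] 1 ht (by simp [pvNoDash]) (by simp) y h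
      · right; exact pvE_pos _ u ['m','a','l','e'] 2 ht (by simp [pvNoDash]) (by simp) y h
      · right; exact pvE_pos _ u ['m'] 2 ht (by simp [pvNoDash]) (by simp) y h
  · rw [if_neg h1]
    by_cases h2 : t = ['f']
    · subst h2
      rw [if_pos rfl, pvOccs_eq]
      apply pvPick_min _ 1
      · rw [pvE_self _ u 1 ht]
        simp
      · intro y hy
        simp only [List.mem_append] at hy
        rw [pvE_self _ u 1 ht] at hy
        rcases hy with ((h | h) | h) | h
        · right; exact pvE_pos _ u ['f','e','m','a','l','e'] 1 ht (by simp [pvNoDash]) (by simp) y h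
        · left; simpa using h
        · right; exact pvE_pos _ u ['m','a','l','e'] 2 ht (by simp [pvNoDash]) (by simp) y h
        · right; exact pvE_pos _ u ['m'] 2 ht (by simp [pvNoDash]) (by simp) y h
    · rw [if_neg h2]
      by_cases h3 : t = ['m','a','l','e']
      · subst h3
        rw [if_pos rfl, pvOccs_eq]
        apply pvPick_min _ 2
        · rw [pvE_self _ u 2 ht]
          simp
        · intro y hy
          simp only [List.mem_append] at hy
          rw [pvE_self _ u 2 ht] at hy
          rcases hy with ((h | h) | h) | h
          · right; exact pvE_pos _ u ['f','e','m','a','l','e'] 1 ht (by simp [pvNoDash]) (by simp) y h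
          · right; exact pvE_pos _ u ['f'] 1 ht (by simp [pvNoDash]) (by simp) y h
          · left; simpa using h
          · right; exact pvE_pos _ u ['m'] 2 ht (by simp [pvNoDash]) (by simp) y h
      · rw [if_neg h3]
        by_cases h4 : t = ['m']
        · subst h4
          rw [if_pos rfl, pvOccs_eq]
          apply pvPick_min _ 2
          · rw [pvE_self _ u 2 ht]
            simp
          · intro y hy
            simp only [List.mem_append] at hy
            rw [pvE_self _ u 2 ht] at hy
            rcases hy with ((h | h) | h) | h
            · right; exact pvE_pos _ u ['f','e','m','a','l','e'] 1 ht (by simp [pvNoDash]) (by simp) y h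
            · right; exact pvE_pos _ u ['f'] 1 ht (by simp [pvNoDash]) (by simp) y h
            · right; exact pvE_pos _ u ['m','a','l','e'] 2 ht (by simp [pvNoDash]) (by simp) y h
            · left; simpa using h
        · rw [if_neg h4]
          rw [pvOccs_eq, pvOccs_eq]
          rw [pvE_shift t u ['f','e','m','a','l','e'] 1 ht (by simp [pvNoDash]) (fun he => h1 he.symm),
              pvE_shift t u ['f'] 1 ht (by simp [pvNoDash]) (fun he => h2 he.symm),
              pvE_shift t u ['m','a','l','e'] 2 ht (by simp [pvNoDash]) (fun he => h3 he.symm),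
              pvE_shift t u ['m'] 2 ht (by simp [pvNoDash]) (fun he => h4 he.symm)]
          rw [← List.map_append, ← List.map_append, ← List.map_append]
          exact pvPick_shift _ _

-- base case: a dash-free name
theorem pvBase (cs : List Char) (h : pvNoDash cs) :
    pvPick (pvOccs ('-' :: cs ++ ['-'])) = pvAltGo (cs ++ ['-']) [] := by
  have hpad : '-' :: cs ++ ['-'] = ('-' :: cs) ++ '-' :: ([] : List Char) := by simp
  have hB : cs ++ ['-'] = cs ++ '-' :: ([] : List Char) := rfl
  rw [hpad, pvStepA cs [] h, hB, pvB_step cs h [] []]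
  simp only [List.nil_append]
  cases hget : pvGenderByTag.get? cs with
  | some k => rfl
  | none => decide

theorem pvMain : ∀ (n : ℕ) (cs : List Char), cs.length ≤ n →
    pvPick (pvOccs ('-' :: cs ++ ['-'])) = pvAltGo (cs ++ ['-']) [] := by
  intro n
  induction n with
  | zero =>
    intro cs h
    have : cs = [] := List.eq_nil_of_length_eq_zero (by omega)
    subst this
    exact pvBase [] (by simp [pvNoDash])
  | succ m ih =>
    intro cs h
    rcases pvDecomp cs with hnd | ⟨t, r, rfl, ht⟩
    · exact pvBase cs hnd
    · have hr : r.length ≤ m := by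
        simp [List.length_append] at h
        omega
      have hA : '-' :: (t ++ '-' :: r) ++ ['-'] = ('-' :: t) ++ '-' :: (r ++ ['-']) := by simp
      have hB : (t ++ '-' :: r) ++ ['-'] = t ++ '-' :: (r ++ ['-']) := by simp
      rw [hA, pvStepA t (r ++ ['-']) ht, hB, pvB_step t ht (r ++ ['-']) []]
      simp only [List.nil_append]
      cases hget : pvGenderByTag.get? t with
      | some k => rfl
      | none =>
        have := ih r hr
        simpa using this

-- ===== VERDICT (by name: the statement is the Claim_ definition above) =====
theorem grab_caller_gender_spec : Claim_equal_grab_caller_gender := by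
  intro c _
  show _ = _
  rw [pvGrab_eq]
  exact pvMain c.toList.length c.toList le_rfl
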